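-- pv_equiv track=rewrite | github.com/evanzilin/Scraping-Automated-pipeline | check_email_dup copy.py | _resolve_single_column
-- ===== SOURCE A (Python) =====
-- from typing import Any, Dict, List, Optional, Tuple, cast
--
-- def _resolve_single_column(
--     headers: List[str], priority: Tuple[str, ...]
-- ) -> Tuple[Optional[int], str]:
--     """First 0-based column index whose header matches ``priority`` order; else (None, '')."""
--     for want in priority:
--         for i, h in enumerate(headers):
--             if h == want:
--                 return i, want
--     return None, ""
-- ===== SOURCE B (Python) =====
-- from typing import List, Optional, Tuple
--
--
-- def _resolve_single_column(
--     headers: List[str], priority: Tuple[str, ...]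
-- ) -> Tuple[Optional[int], str]:
--     """Rank map over priority, then one scan over headers keeping the smallest-rank candidate."""
--     rank = {}
--     for r, v in enumerate(priority):
--         if v not in rank:
--             rank[v] = r
--     best = None  # (rank, index, value)
--     for i, h in enumerate(headers):
--         r = rank.get(h)
--         if r is not None and (best is None or r < best[0]):
--             best = (r, i, h)
--     if best is None:
--         return None, ""
--     return best[1], best[2]
-- ===== Notes on version B (the rewrite author's own statement) =====
-- stated objective: alternative
-- what changed: Inverts the traversal: builds a first-wins rank map over priority once, then a single pass over headers keeps the candidate with the strictly smallest rank, replacing A's nested priority-then-headers loops with early return.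
import Mathlib
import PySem

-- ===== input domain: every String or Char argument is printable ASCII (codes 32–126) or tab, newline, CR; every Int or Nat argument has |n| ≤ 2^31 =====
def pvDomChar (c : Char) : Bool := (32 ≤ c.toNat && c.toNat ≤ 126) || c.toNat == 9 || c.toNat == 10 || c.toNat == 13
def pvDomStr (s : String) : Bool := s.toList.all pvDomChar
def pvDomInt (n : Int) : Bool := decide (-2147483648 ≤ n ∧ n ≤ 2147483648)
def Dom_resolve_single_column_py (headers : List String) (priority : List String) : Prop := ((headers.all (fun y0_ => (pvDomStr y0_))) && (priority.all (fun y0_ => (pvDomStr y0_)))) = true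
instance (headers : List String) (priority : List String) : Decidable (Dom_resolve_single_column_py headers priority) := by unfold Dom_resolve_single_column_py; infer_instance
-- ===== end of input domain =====

-- B builds a first-wins rank map over priority once, then one scan over headers keeps the smallest-rank candidate, instead of A's nested priority-then-headers loops.


-- ===== PORT A =====
-- inner loop: 'for i, h in enumerate(headers): if h == want: return i'
def pvAScan (want : String) : List (Int × String) → Option Int
  | [] => none
  | (i, h) :: rest => if h = want then some i else pvAScan want rest

-- outer loop: 'for want in priority: …; return None, ""'
def pvALoop (headers : List String) : List String → Option Int × String
  | [] => (none, "")
  | w :: ps =>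
      match pvAScan w (PySem.List.enumerate headers 0) with
      | some i => (some i, w)
      | none => pvALoop headers ps

def resolve_single_column_py (headers : List String) (priority : List String) : Option Int × String :=
  pvALoop headers priority

-- ===== PORT B =====
-- 'for r, v in enumerate(priority): if v not in rank: rank[v] = r'
def pvRankLoop : List (Int × String) → PySem.Dict String Int → PySem.Dict String Int
  | [], d => d
  | (r, v) :: rest, d => pvRankLoop rest (if d.contains v then d else d.insert v r)

-- one iteration of B's header loop; best is (rank, index, value)
def pvBStep (rank : PySem.Dict String Int) (best : Option (Int × Int × String)) (p : Int × String) : Option (Int × Int × String) :=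
  match rank.get? p.2 with
  | none => best
  | some r =>
      match best with
      | none => some (r, p.1, p.2)
      | some b => if r < b.1 then some (r, p.1, p.2) else best

def resolve_single_column_py_alt (headers : List String) (priority : List String) : Option Int × String :=
  let rank := pvRankLoop (PySem.List.enumerate priority 0) PySem.Dict.empty
  match (PySem.List.enumerate headers 0).foldl (pvBStep rank) none with
  | none => (none, "")
  | some b => (some b.2.1, b.2.2)

-- ===== PRECONDITION & SPEC =====
def Spec_resolve_single_column_py (headers : List String) (priority : List String) (out : Option Int × String) : Prop := out = resolve_single_column_py_alt headers priority
instance (headers : List String) (priority : List String) (out : Option Int × String) : Decidable (Spec_resolve_single_column_py headers priority out) := by unfold Spec_resolve_single_column_py; infer_instance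

-- ===== CLAIM (what is proved, stated in full; the proofs are below) =====
def Claim_equal_resolve_single_column_py : Prop := ∀ (headers : List String) (priority : List String), Dom_resolve_single_column_py headers priority → Spec_resolve_single_column_py headers priority (resolve_single_column_py headers priority)

-- ===== LEMMAS AND PROOFS =====

-- proof-side step: pvBStep with the rank lookup replaced by index? into priority
def pvStepI (pr : List String) (best : Option (Int × Int × String)) (p : Int × String) : Option (Int × Int × String) :=
  match PySem.List.index? pr p.2 with
  | none => best
  | some k =>
      match best with
      | none => some ((k : Int), p.1, p.2)
      | some b => if (k : Int) < b.1 then some ((k : Int), p.1, p.2) else best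

-- the first-wins rank loop realises index? (shifted by the running counter)
theorem pvRankLoop_get? (h : String) (ps : List String) (s : Int) (d : PySem.Dict String Int) :
    (pvRankLoop (PySem.List.enumerate ps s) d).get? h
      = if d.contains h then d.get? h
        else (match PySem.List.index? ps h with
              | none => none
              | some k => some (s + Int.ofNat k)) := by
  induction ps generalizing s d with
  | nil =>
    rw [PySem.List.enumerate_nil]
    unfold pvRankLoop
    cases hc : d.contains h with
    | true => simp
    | false =>
      rw [if_neg (by simp)]
      simp only [PySem.List.index?]
      exact (PySem.Dict.get?_eq_none_iff_contains d h).mpr hc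
  | cons v vs ih =>
    rw [PySem.List.enumerate_cons]
    unfold pvRankLoop
    rw [ih]
    by_cases hch : d.contains h = true
    · rw [if_pos hch]
      cases hcv : d.contains v with
      | true => simp [hch]
      | false =>
        have hv : h ≠ v := fun he => by rw [he] at hch; rw [hch] at hcv; cases hcv
        simp [PySem.Dict.contains_insert, hch, PySem.Dict.get?_insert_of_ne d s hv]
    · rw [if_neg hch]
      have hch' : d.contains h = false := by simpa using hch
      by_cases hv : h = v
      · subst hv
        rw [PySem.List.index?_cons_self]
        simp [hch', PySem.Dict.get?_insert_self]
      · rw [PySem.List.index?_cons_of_ne vs (fun hvh => hv hvh.symm)]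
        have hd' : (if d.contains v then d else d.insert v s).contains h = false := by
          cases hcv : d.contains v with
          | true => simpa [hcv] using hch'
          | false => simp [PySem.Dict.contains_insert, hch', hv]
        rw [if_neg (by simp [hd'])]
        cases PySem.List.index? vs h with
        | none => simp
        | some k =>
          simp only [Option.map_some, Int.ofNat_eq_natCast]
          congr 1
          push_cast
          ring

-- hence B's step over the built rank map IS the index?-based step
theorem pvBStep_eq_pvStepI (pr : List String) :
    pvBStep (pvRankLoop (PySem.List.enumerate pr 0) PySem.Dict.empty) = pvStepI pr := by
  funext best p
  unfold pvBStep pvStepI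
  rw [pvRankLoop_get? p.2 pr 0 PySem.Dict.empty]
  rw [if_neg (by simp)]
  cases PySem.List.index? pr p.2 <;> simp

-- with empty priority the scan never changes the accumulator
theorem pvB_foldl_nil (L : List (Int × String)) (acc : Option (Int × Int × String)) :
    L.foldl (pvStepI []) acc = acc := by
  induction L generalizing acc with
  | nil => rfl
  | cons p L ih => simpa [pvStepI, PySem.List.index?] using ih acc

-- rank 0 is absorbing: once best has rank 0 it never changes
theorem pvB_foldl_zero (pr : List String) (L : List (Int × String)) (i : Int) (v : String) :
    L.foldl (pvStepI pr) (some (0, i, v)) = some (0, i, v) := by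
  induction L with
  | nil => rfl
  | cons p L ih =>
    have hstep : pvStepI pr (some (0, i, v)) p = some (0, i, v) := by
      unfold pvStepI
      cases PySem.List.index? pr p.2 with
      | none => rfl
      | some k => simp
    rw [List.foldl_cons, hstep, ih]

-- if w occurs in headers at position k, the scan for (w :: ps) lands on (0, s+k, w)
theorem pvB_foldl_found (ps : List String) (w : String) (headers : List String)
    (s : Int) (k : Nat) (acc : Option (Int × Int × String))
    (hk : PySem.List.index? headers w = some k)
    (hacc : ∀ b, acc = some b → 0 < b.1) :
    (PySem.List.enumerate headers s).foldl (pvStepI (w :: ps)) acc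
      = some (0, s + (k : Int), w) := by
  induction headers generalizing s k acc with
  | nil => simp [PySem.List.index?] at hk
  | cons h t ih =>
    rw [PySem.List.enumerate_cons, List.foldl_cons]
    by_cases hw : h = w
    · subst hw
      rw [PySem.List.index?_cons_self] at hk
      obtain rfl : k = 0 := by simpa using hk.symm
      have hstep : pvStepI (h :: ps) acc (s, h) = some (0, s, h) := by
        unfold pvStepI
        simp only [PySem.List.index?_cons_self]
        cases hca : acc with
        | none => rfl
        | some b =>
            have hb1 := hacc b hca
            simp [hb1]
      rw [hstep, pvB_foldl_zero]
      simp
    · rw [PySem.List.index?_cons_of_ne t hw] at hk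
      cases hkt : PySem.List.index? t w with
      | none => rw [hkt] at hk; simp at hk
      | some k' =>
        rw [hkt] at hk
        obtain rfl : k = k' + 1 := by simpa using hk.symm
        have hstep : ∀ b, pvStepI (w :: ps) acc (s, h) = some b → 0 < b.1 := by
          intro b hb
          unfold pvStepI at hb
          rcases hidx : PySem.List.index? (w :: ps) h with _ | r
          · rw [hidx] at hb; exact hacc b hb
          · rw [hidx] at hb
            rw [PySem.List.index?_cons_of_ne ps (fun hwh => hw hwh.symm)] at hidx
            cases hips : PySem.List.index? ps h with
            | none => rw [hips] at hidx; simp at hidx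
            | some r' =>
              rw [hips] at hidx
              obtain rfl : r = r' + 1 := by simpa using hidx.symm
              cases hca : acc with
              | none =>
                rw [hca] at hb
                simp only at hb
                cases hb
                simp
              | some b0 =>
                rw [hca] at hb
                simp only at hb
                by_cases hlt : ((r' + 1 : Nat) : Int) < b0.1
                · rw [if_pos hlt] at hb
                  cases hb
                  simp
                · rw [if_neg hlt] at hb
                  cases hb
                  exact hacc _ hca
        have harith : (s + 1) + (k' : Int) = s + ((k' + 1 : Nat) : Int) := by push_cast; ring
        rw [ih (s + 1) k' _ hkt hstep, harith]

-- if w is absent from headers, scanning for (w :: ps) is scanning for ps with all ranks shifted by 1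
theorem pvB_foldl_shift (ps : List String) (w : String) (headers : List String)
    (s : Int) (acc : Option (Int × Int × String)) (hw : w ∉ headers) :
    (PySem.List.enumerate headers s).foldl (pvStepI (w :: ps))
        (acc.map (fun b => (b.1 + 1, b.2)))
      = ((PySem.List.enumerate headers s).foldl (pvStepI ps) acc).map
          (fun b => (b.1 + 1, b.2)) := by
  induction headers generalizing s acc with
  | nil => simp [PySem.List.enumerate_nil]
  | cons h t ih =>
    have hhw : h ≠ w := fun hh => hw (by simp [hh])
    have htw : w ∉ t := fun hh => hw (by simp [hh])
    rw [PySem.List.enumerate_cons, List.foldl_cons, List.foldl_cons]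
    have hstep : pvStepI (w :: ps) (acc.map (fun b => (b.1 + 1, b.2))) (s, h)
        = (pvStepI ps acc (s, h)).map (fun b => (b.1 + 1, b.2)) := by
      unfold pvStepI
      simp only
      rw [PySem.List.index?_cons_of_ne ps (fun hwh => hhw hwh.symm)]
      cases PySem.List.index? ps h with
      | none => simp
      | some r =>
        cases acc with
        | none => simp
        | some b =>
          simp only [Option.map_some]
          by_cases hlt : (r : Int) < b.1
          · rw [if_pos hlt, if_pos (by push_cast; omega)]
            simp
          · rw [if_neg hlt, if_neg (by push_cast; omega)]
            simp
    rw [hstep, ih (s + 1) _ htw]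

-- A's inner scan over the enumeration is index? shifted by the start
theorem pvAScan_enumerate (w : String) (headers : List String) (s : Int) :
    pvAScan w (PySem.List.enumerate headers s)
      = (match PySem.List.index? headers w with
         | none => none
         | some k => some (s + Int.ofNat k)) := by
  induction headers generalizing s with
  | nil => simp [pvAScan, PySem.List.enumerate_nil, PySem.List.index?]
  | cons h t ih =>
    rw [PySem.List.enumerate_cons]
    by_cases hw : h = w
    · subst hw
      rw [PySem.List.index?_cons_self]
      simp [pvAScan]
    · rw [PySem.List.index?_cons_of_ne t hw]
      simp only [pvAScan, if_neg hw, ih (s + 1)]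
      cases PySem.List.index? t w with
      | none => simp
      | some k =>
        simp only [Option.map_some]
        congr 1
        simp only [Int.ofNat_eq_natCast]
        push_cast
        ring

theorem pv_main (headers priority : List String) :
    pvALoop headers priority = resolve_single_column_py_alt headers priority := by
  induction priority with
  | nil =>
    simp only [resolve_single_column_py_alt]
    rw [pvBStep_eq_pvStepI [], pvB_foldl_nil]
    simp [pvALoop]
  | cons w ps ih =>
    unfold pvALoop
    rw [pvAScan_enumerate]
    cases hk : PySem.List.index? headers w with
    | some k =>
      simp only [resolve_single_column_py_alt]
      rw [pvBStep_eq_pvStepI (w :: ps)]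
      rw [pvB_foldl_found ps w headers 0 k none hk (by simp)]
      simp [Int.ofNat_eq_natCast]
    | none =>
      rw [ih]
      simp only [resolve_single_column_py_alt]
      rw [pvBStep_eq_pvStepI (w :: ps), pvBStep_eq_pvStepI ps]
      have hw : w ∉ headers := (PySem.List.index?_eq_none_iff headers w).mp hk
      have hshift := pvB_foldl_shift ps w headers 0 none hw
      simp only [Option.map_none] at hshift
      rw [hshift]
      cases (PySem.List.enumerate headers 0).foldl (pvStepI ps) none <;> simp

-- ===== VERDICT (by name: the statement is the Claim_ definition above) =====
theorem resolve_single_column_py_spec : Claim_equal_resolve_single_column_py := by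
  intro headers priority _
  unfold Spec_resolve_single_column_py resolve_single_column_py
  exact pv_main headers priority
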